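-- pv_equiv track=rewrite | github.com/LackOfSkillz/DireEngine | world/area_forge/extract/yaml_graph.py | _infer_grid_spacing
-- ===== SOURCE A (Python) =====
-- from collections import defaultdict, deque
--
-- def _infer_grid_spacing(nodes, config):
--     x_diffs = []
--     y_diffs = []
--     for node in list(nodes or []):
--         for other in list(nodes or []):
--             if node.get("id") == other.get("id"):
--                 continue
--             dx = abs(int(node.get("x", 0)) - int(other.get("x", 0)))
--             dy = abs(int(node.get("y", 0)) - int(other.get("y", 0)))
--             if dy <= 3 and int(config.get("grid_spacing_min", 12)) <= dx <= int(config.get("grid_spacing_max", 18)):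
--                 x_diffs.append(dx)
--             if dx <= 3 and int(config.get("grid_spacing_min", 12)) <= dy <= int(config.get("grid_spacing_max", 18)):
--                 y_diffs.append(dy)
--     counts = defaultdict(int)
--     for value in x_diffs + y_diffs:
--         counts[value] += 1
--     if not counts:
--         return 14
--     return max(sorted(counts), key=lambda value: counts[value])
-- ===== SOURCE B (Python) =====
-- def _infer_grid_spacing(nodes, config):
--     lo = int(config.get("grid_spacing_min", 12))
--     hi = int(config.get("grid_spacing_max", 18))
--     counts = {}
--     rest = list(nodes or [])
--     while rest:
--         a, rest = rest[0], rest[1:]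
--         for b in rest:
--             if a.get("id") == b.get("id"):
--                 continue
--             dx = abs(int(a.get("x", 0)) - int(b.get("x", 0)))
--             dy = abs(int(a.get("y", 0)) - int(b.get("y", 0)))
--             if dy <= 3 and lo <= dx <= hi:
--                 counts[dx] = counts.get(dx, 0) + 1
--             if dx <= 3 and lo <= dy <= hi:
--                 counts[dy] = counts.get(dy, 0) + 1
--     best = None
--     for v, c in counts.items():
--         if best is None or c > best[1] or (c == best[1] and v < best[0]):
--             best = (v, c)
--     return 14 if best is None else best[0]
-- ===== Notes on version B (the rewrite author's own statement) =====
-- stated objective: alternative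
-- what changed: B visits each unordered node pair once (exploiting the symmetry of the |dx|/|dy| tests, which exactly halves every count and so preserves the argmax), hoists the config bounds out of the inner loop, counts straight into a dict, and picks the smallest most-common value by a single linear scan instead of sorting the keys.
import Mathlib
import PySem

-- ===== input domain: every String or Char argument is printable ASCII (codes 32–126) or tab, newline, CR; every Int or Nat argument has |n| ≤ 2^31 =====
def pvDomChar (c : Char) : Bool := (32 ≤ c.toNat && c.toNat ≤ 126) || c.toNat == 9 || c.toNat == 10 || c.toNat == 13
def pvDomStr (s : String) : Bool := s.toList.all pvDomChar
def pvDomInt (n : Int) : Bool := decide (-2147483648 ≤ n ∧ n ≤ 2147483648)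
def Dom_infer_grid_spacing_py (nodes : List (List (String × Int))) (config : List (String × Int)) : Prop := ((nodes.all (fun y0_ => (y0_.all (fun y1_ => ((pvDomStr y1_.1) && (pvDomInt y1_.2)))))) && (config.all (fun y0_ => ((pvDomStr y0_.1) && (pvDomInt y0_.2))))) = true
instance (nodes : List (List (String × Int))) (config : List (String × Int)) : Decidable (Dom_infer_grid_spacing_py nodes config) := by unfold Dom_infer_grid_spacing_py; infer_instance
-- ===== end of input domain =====

-- B visits each unordered node pair once (the |dx|/|dy| tests are symmetric, so this halves
-- every count and keeps the argmax), hoists the config bounds out of the inner loop, counts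
-- straight into a dict, and selects the smallest most-common value by one linear scan instead
-- of sorting the keys.

-- d.get(k) / d.get(k, v) on a Python dict given as an association list (first match wins)
def dGet (d : List (String × Int)) (k : String) : Option Int := (PySem.Dict.mk d).get? k
def dGetD (d : List (String × Int)) (k : String) (v : Int) : Int := (PySem.Dict.mk d).getD k v

-- ===== PORT A =====
def infer_grid_spacing_py (nodes : List (List (String × Int))) (config : List (String × Int)) : Int :=
  let diffs := nodes.foldl (fun acc node =>
      nodes.foldl (fun acc2 other =>
        if dGet node "id" == dGet other "id" then acc2
        else
          let dx := |dGetD node "x" 0 - dGetD other "x" 0|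
          let dy := |dGetD node "y" 0 - dGetD other "y" 0|
          let acc3 := if dy ≤ 3 ∧ dGetD config "grid_spacing_min" 12 ≤ dx ∧ dx ≤ dGetD config "grid_spacing_max" 18
                      then (acc2.1 ++ [dx], acc2.2) else acc2
          if dx ≤ 3 ∧ dGetD config "grid_spacing_min" 12 ≤ dy ∧ dy ≤ dGetD config "grid_spacing_max" 18
          then (acc3.1, acc3.2 ++ [dy]) else acc3)
        acc)
    (([] : List Int), ([] : List Int))
  let counts := (diffs.1 ++ diffs.2).foldl (fun d v => d.modify v 0 (· + 1)) (PySem.Dict.empty : PySem.Dict Int Int)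
  if counts.size = 0 then 14
  else (PySem.List.max? (PySem.List.sorted counts.keys (fun v => v) false) (fun v => counts.getD v 0)).getD 14

-- ===== PORT B =====
-- one unordered pair (a, b): the two conditional count increments
def pairStep (lo hi : Int) (a b : List (String × Int)) (c : PySem.Dict Int Int) : PySem.Dict Int Int :=
  if dGet a "id" == dGet b "id" then c
  else
    let dx := |dGetD a "x" 0 - dGetD b "x" 0|
    let dy := |dGetD a "y" 0 - dGetD b "y" 0|
    let c1 := if dy ≤ 3 ∧ lo ≤ dx ∧ dx ≤ hi then c.insert dx (c.getD dx 0 + 1) else c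
    if dx ≤ 3 ∧ lo ≤ dy ∧ dy ≤ hi then c1.insert dy (c1.getD dy 0 + 1) else c1

-- 'while rest: a, rest = rest[0], rest[1:]; for b in rest: …'
def altCount (lo hi : Int) : List (List (String × Int)) → PySem.Dict Int Int → PySem.Dict Int Int
  | [], c => c
  | a :: rest, c => altCount lo hi rest (rest.foldl (fun c b => pairStep lo hi a b c) c)

def infer_grid_spacing_py_alt (nodes : List (List (String × Int))) (config : List (String × Int)) : Int :=
  let lo := dGetD config "grid_spacing_min" 12
  let hi := dGetD config "grid_spacing_max" 18
  let counts := altCount lo hi nodes PySem.Dict.empty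
  let best := counts.items.foldl (fun best p =>
      match best with
      | none => some p
      | some q => if p.2 > q.2 ∨ (p.2 = q.2 ∧ p.1 < q.1) then some p else some q) none
  match best with
  | none => 14
  | some q => q.1

-- ===== PRECONDITION & SPEC =====
def Spec_infer_grid_spacing_py (nodes : List (List (String × Int))) (config : List (String × Int)) (out : Int) : Prop := out = infer_grid_spacing_py_alt nodes config
instance (nodes : List (List (String × Int))) (config : List (String × Int)) (out : Int) : Decidable (Spec_infer_grid_spacing_py nodes config out) := by unfold Spec_infer_grid_spacing_py; infer_instance

-- ===== CLAIM (what is proved, stated in full; the proofs are below) =====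
def Claim_equal_infer_grid_spacing_py : Prop := ∀ (nodes : List (List (String × Int))) (config : List (String × Int)), Dom_infer_grid_spacing_py nodes config → Spec_infer_grid_spacing_py nodes config (infer_grid_spacing_py nodes config)

-- ===== LEMMAS AND PROOFS =====

-- per-ordered-pair contributions of A's double loop
def fx (lo hi : Int) (n o : List (String × Int)) : List Int :=
  if dGet n "id" == dGet o "id" then []
  else if |dGetD n "y" 0 - dGetD o "y" 0| ≤ 3 ∧ lo ≤ |dGetD n "x" 0 - dGetD o "x" 0| ∧ |dGetD n "x" 0 - dGetD o "x" 0| ≤ hi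
       then [|dGetD n "x" 0 - dGetD o "x" 0|] else []

def fy (lo hi : Int) (n o : List (String × Int)) : List Int :=
  if dGet n "id" == dGet o "id" then []
  else if |dGetD n "x" 0 - dGetD o "x" 0| ≤ 3 ∧ lo ≤ |dGetD n "y" 0 - dGetD o "y" 0| ∧ |dGetD n "y" 0 - dGetD o "y" 0| ≤ hi
       then [|dGetD n "y" 0 - dGetD o "y" 0|] else []

def g (lo hi : Int) (n o : List (String × Int)) : List Int := fx lo hi n o ++ fy lo hi n o

-- triangular ("each unordered pair once") value list: what B counts
def T (lo hi : Int) : List (List (String × Int)) → List Int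
  | [] => []
  | a :: rest => rest.flatMap (g lo hi a) ++ T lo hi rest

-- the value both programs return on a non-empty count table: the smallest most-common value of l
def Pbest (l : List Int) (m : Int) : Prop :=
  m ∈ l ∧ ∀ y ∈ l, l.count y ≤ l.count m ∧ (l.count y = l.count m → m ≤ y)

theorem Pbest_unique (l : List Int) (m m' : Int)
    (h : Pbest l m) (h' : Pbest l m') : m = m' := by
  obtain ⟨hm, hall⟩ := h
  obtain ⟨hm', hall'⟩ := h'
  have h1 := hall m' hm'
  have h2 := hall' m hm
  have hc : l.count m = l.count m' := le_antisymm h2.1 h1.1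
  exact le_antisymm (h1.2 hc.symm) (h2.2 hc)

theorem g_symm (lo hi : Int) (a b : List (String × Int)) : g lo hi a b = g lo hi b a := by
  simp only [g, fx, fy]
  rcases Bool.eq_false_or_eq_true (dGet a "id" == dGet b "id") with h | h <;>
    rw [show (dGet b "id" == dGet a "id") = (dGet a "id" == dGet b "id") from BEq.comm, h] <;>
    simp <;>
    rw [abs_sub_comm (dGetD a "y" 0), abs_sub_comm (dGetD a "x" 0)]

theorem g_diag (lo hi : Int) (a : List (String × Int)) : g lo hi a a = [] := by
  simp [g, fx, fy]

-- ---- A's nested loop produces the ordered-pair contribution lists ----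

theorem A_step (lo hi : Int) (n o : List (String × Int)) (acc : List Int × List Int) :
    (if dGet n "id" == dGet o "id" then acc
     else
       if |dGetD n "x" 0 - dGetD o "x" 0| ≤ 3 ∧ lo ≤ |dGetD n "y" 0 - dGetD o "y" 0| ∧ |dGetD n "y" 0 - dGetD o "y" 0| ≤ hi
       then (((if |dGetD n "y" 0 - dGetD o "y" 0| ≤ 3 ∧ lo ≤ |dGetD n "x" 0 - dGetD o "x" 0| ∧ |dGetD n "x" 0 - dGetD o "x" 0| ≤ hi
               then (acc.1 ++ [|dGetD n "x" 0 - dGetD o "x" 0|], acc.2) else acc) : List Int × List Int).1,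
             ((if |dGetD n "y" 0 - dGetD o "y" 0| ≤ 3 ∧ lo ≤ |dGetD n "x" 0 - dGetD o "x" 0| ∧ |dGetD n "x" 0 - dGetD o "x" 0| ≤ hi
               then (acc.1 ++ [|dGetD n "x" 0 - dGetD o "x" 0|], acc.2) else acc) : List Int × List Int).2 ++ [|dGetD n "y" 0 - dGetD o "y" 0|])
       else (if |dGetD n "y" 0 - dGetD o "y" 0| ≤ 3 ∧ lo ≤ |dGetD n "x" 0 - dGetD o "x" 0| ∧ |dGetD n "x" 0 - dGetD o "x" 0| ≤ hi
             then (acc.1 ++ [|dGetD n "x" 0 - dGetD o "x" 0|], acc.2) else acc))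
    = (acc.1 ++ fx lo hi n o, acc.2 ++ fy lo hi n o) := by
  simp only [fx, fy]
  split_ifs <;> simp

theorem A_inner (lo hi : Int) (n : List (String × Int)) (ys : List (List (String × Int)))
    (acc : List Int × List Int) :
    ys.foldl (fun acc2 other =>
      if dGet n "id" == dGet other "id" then acc2
      else
        if |dGetD n "x" 0 - dGetD other "x" 0| ≤ 3 ∧ lo ≤ |dGetD n "y" 0 - dGetD other "y" 0| ∧ |dGetD n "y" 0 - dGetD other "y" 0| ≤ hi
        then (((if |dGetD n "y" 0 - dGetD other "y" 0| ≤ 3 ∧ lo ≤ |dGetD n "x" 0 - dGetD other "x" 0| ∧ |dGetD n "x" 0 - dGetD other "x" 0| ≤ hi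
                then (acc2.1 ++ [|dGetD n "x" 0 - dGetD other "x" 0|], acc2.2) else acc2) : List Int × List Int).1,
              ((if |dGetD n "y" 0 - dGetD other "y" 0| ≤ 3 ∧ lo ≤ |dGetD n "x" 0 - dGetD other "x" 0| ∧ |dGetD n "x" 0 - dGetD other "x" 0| ≤ hi
                then (acc2.1 ++ [|dGetD n "x" 0 - dGetD other "x" 0|], acc2.2) else acc2) : List Int × List Int).2 ++ [|dGetD n "y" 0 - dGetD other "y" 0|])
        else (if |dGetD n "y" 0 - dGetD other "y" 0| ≤ 3 ∧ lo ≤ |dGetD n "x" 0 - dGetD other "x" 0| ∧ |dGetD n "x" 0 - dGetD other "x" 0| ≤ hi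
              then (acc2.1 ++ [|dGetD n "x" 0 - dGetD other "x" 0|], acc2.2) else acc2)) acc
    = (acc.1 ++ ys.flatMap (fx lo hi n), acc.2 ++ ys.flatMap (fy lo hi n)) := by
  induction ys generalizing acc with
  | nil => simp
  | cons o t ih =>
    simp only [List.foldl_cons, List.flatMap_cons]
    rw [A_step lo hi n o acc, ih]
    simp

theorem A_outer (lo hi : Int) (nodes xs : List (List (String × Int))) (acc : List Int × List Int) :
    xs.foldl (fun acc node =>
      nodes.foldl (fun acc2 other =>
        if dGet node "id" == dGet other "id" then acc2
        else
          if |dGetD node "x" 0 - dGetD other "x" 0| ≤ 3 ∧ lo ≤ |dGetD node "y" 0 - dGetD other "y" 0| ∧ |dGetD node "y" 0 - dGetD other "y" 0| ≤ hi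
          then (((if |dGetD node "y" 0 - dGetD other "y" 0| ≤ 3 ∧ lo ≤ |dGetD node "x" 0 - dGetD other "x" 0| ∧ |dGetD node "x" 0 - dGetD other "x" 0| ≤ hi
                  then (acc2.1 ++ [|dGetD node "x" 0 - dGetD other "x" 0|], acc2.2) else acc2) : List Int × List Int).1,
                ((if |dGetD node "y" 0 - dGetD other "y" 0| ≤ 3 ∧ lo ≤ |dGetD node "x" 0 - dGetD other "x" 0| ∧ |dGetD node "x" 0 - dGetD other "x" 0| ≤ hi
                  then (acc2.1 ++ [|dGetD node "x" 0 - dGetD other "x" 0|], acc2.2) else acc2) : List Int × List Int).2 ++ [|dGetD node "y" 0 - dGetD other "y" 0|])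
          else (if |dGetD node "y" 0 - dGetD other "y" 0| ≤ 3 ∧ lo ≤ |dGetD node "x" 0 - dGetD other "x" 0| ∧ |dGetD node "x" 0 - dGetD other "x" 0| ≤ hi
                then (acc2.1 ++ [|dGetD node "x" 0 - dGetD other "x" 0|], acc2.2) else acc2)) acc) acc
    = (acc.1 ++ xs.flatMap (fun n => nodes.flatMap (fx lo hi n)),
       acc.2 ++ xs.flatMap (fun n => nodes.flatMap (fy lo hi n))) := by
  induction xs generalizing acc with
  | nil => simp
  | cons n t ih =>
    simp only [List.foldl_cons]
    rw [List.flatMap_cons, List.flatMap_cons, A_inner lo hi n nodes acc, ih]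
    simp

-- ---- counting lemmas ----

theorem count_flatMap_append {X : Type} (t : List X) (p q : X → List Int) (v : Int) :
    (t.flatMap (fun x => p x ++ q x)).count v = (t.flatMap p).count v + (t.flatMap q).count v := by
  induction t with
  | nil => simp
  | cons a t ih => simp only [List.flatMap_cons, List.count_append, ih]; omega

theorem count_O_eq_two_T (lo hi : Int) (xs : List (List (String × Int))) (v : Int) :
    (xs.flatMap (fun n => xs.flatMap (g lo hi n))).count v = 2 * (T lo hi xs).count v := by
  induction xs with
  | nil => simp [T]
  | cons a t ih =>
    have hsy : (fun n => g lo hi n a) = (fun n => g lo hi a n) := by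
      funext n; exact g_symm lo hi n a
    calc ((a :: t).flatMap (fun n => (a :: t).flatMap (g lo hi n))).count v
        = ((a :: t).flatMap (g lo hi a)).count v
          + (t.flatMap (fun n => g lo hi n a ++ t.flatMap (g lo hi n))).count v := by
          simp only [List.flatMap_cons, List.count_append]
      _ = (t.flatMap (g lo hi a)).count v
          + ((t.flatMap (fun n => g lo hi n a)).count v
             + (t.flatMap (fun n => t.flatMap (g lo hi n))).count v) := by
          rw [count_flatMap_append]
          simp [List.flatMap_cons, g_diag]
      _ = (t.flatMap (g lo hi a)).count v
          + ((t.flatMap (g lo hi a)).count v + 2 * (T lo hi t).count v) := by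
          rw [hsy, ih]
      _ = 2 * (T lo hi (a :: t)).count v := by
          simp only [T, List.count_append]; omega

theorem count_flatMap_congr {X : Type} (t : List X) (p q : X → List Int) (v : Int)
    (h : ∀ x ∈ t, (p x).count v = (q x).count v) :
    (t.flatMap p).count v = (t.flatMap q).count v := by
  induction t with
  | nil => simp
  | cons a t ih =>
    simp only [List.flatMap_cons, List.count_append]
    rw [h a (by simp), ih (fun x hx => h x (by simp [hx]))]

theorem count_DA (lo hi : Int) (xs : List (List (String × Int))) (v : Int) :
    (xs.flatMap (fun n => xs.flatMap (fx lo hi n)) ++ xs.flatMap (fun n => xs.flatMap (fy lo hi n))).count v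
    = 2 * (T lo hi xs).count v := by
  rw [← count_O_eq_two_T lo hi xs v, List.count_append]
  rw [count_flatMap_congr xs (fun n => xs.flatMap (g lo hi n))
        (fun n => xs.flatMap (fx lo hi n) ++ xs.flatMap (fy lo hi n)) v
        (fun n _ => by
          simpa [g, List.count_append] using count_flatMap_append xs (fx lo hi n) (fy lo hi n) v)]
  exact (count_flatMap_append xs _ _ v).symm

theorem mem_DA_iff_mem_T (lo hi : Int) (xs : List (List (String × Int))) (v : Int) :
    v ∈ (xs.flatMap (fun n => xs.flatMap (fx lo hi n)) ++ xs.flatMap (fun n => xs.flatMap (fy lo hi n)))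
    ↔ v ∈ T lo hi xs := by
  rw [← List.count_pos_iff, ← List.count_pos_iff, count_DA]
  omega

-- ---- B's dict is the counter of T ----

theorem pairStep_eq (lo hi : Int) (a b : List (String × Int)) (c : PySem.Dict Int Int) :
    pairStep lo hi a b c
    = (g lo hi a b).foldl (fun c v => c.insert v (c.getD v 0 + 1)) c := by
  simp only [pairStep, g, fx, fy]
  split_ifs <;> simp

theorem B_inner (lo hi : Int) (a : List (String × Int)) (rest : List (List (String × Int)))
    (c : PySem.Dict Int Int) :
    rest.foldl (fun c b => pairStep lo hi a b c) c
    = (rest.flatMap (g lo hi a)).foldl (fun c v => c.insert v (c.getD v 0 + 1)) c := by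
  rw [List.foldl_flatMap]
  simp only [pairStep_eq]

theorem altCount_eq (lo hi : Int) (xs : List (List (String × Int))) (c : PySem.Dict Int Int) :
    altCount lo hi xs c = (T lo hi xs).foldl (fun c v => c.insert v (c.getD v 0 + 1)) c := by
  induction xs generalizing c with
  | nil => simp [altCount, T]
  | cons a t ih =>
    simp only [altCount, T, List.foldl_append]
    rw [B_inner, ih]

-- ---- selection folds ----

theorem maxfold_aux (keyf : Int → Int) (f : Option Int → Int → Option Int)
    (hf : ∀ mm x, f (some mm) x = if keyf mm < keyf x then some x else some mm) (t : List Int) :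
    ∀ (a : Int), t.Pairwise (· < ·) → (∀ y ∈ t, a < y) →
    ∃ m, t.foldl f (some a) = some m
      ∧ (m = a ∨ m ∈ t) ∧ keyf a ≤ keyf m ∧ (∀ y ∈ t, keyf y ≤ keyf m)
      ∧ (keyf m = keyf a → m = a) ∧ (∀ y ∈ t, keyf y = keyf m → m ≤ y) := by
  induction t with
  | nil => intro a _ _; exact ⟨a, rfl, Or.inl rfl, le_refl _, by simp, fun _ => rfl, by simp⟩
  | cons b t ih =>
    intro a hpw hlt
    have hpc := List.pairwise_cons.mp hpw
    simp only [List.foldl_cons, hf]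
    by_cases hk : keyf a < keyf b
    · rw [if_pos hk]
      obtain ⟨m, hm, hmem, hab, hall, heq, hfirst⟩ := ih b hpc.2 hpc.1
      refine ⟨m, hm, Or.inr (hmem.elim (fun h => h ▸ List.mem_cons_self) (List.mem_cons_of_mem b)), le_of_lt (lt_of_lt_of_le hk hab), ?_, ?_, ?_⟩
      · intro y hy
        rcases List.mem_cons.mp hy with h | h
        · exact h ▸ hab
        · exact hall y h
      · intro h; omega
      · intro y hy hkey
        rcases List.mem_cons.mp hy with h | h
        · subst h; exact le_of_eq (heq hkey.symm)
        · exact hfirst y h hkey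
    · rw [if_neg hk]
      rw [not_lt] at hk
      obtain ⟨m, hm, hmem, hab, hall, heq, hfirst⟩ :=
        ih a hpc.2 (fun y hy => hlt y (List.mem_cons_of_mem b hy))
      refine ⟨m, hm, hmem.imp id (List.mem_cons_of_mem b), hab, ?_, heq, ?_⟩
      · intro y hy
        rcases List.mem_cons.mp hy with h | h
        · subst h; exact le_trans hk hab
        · exact hall y h
      · intro y hy hkey
        rcases List.mem_cons.mp hy with h | h
        · subst h
          have hma : keyf m = keyf a := by omega
          have := heq hma
          have hb := hlt y List.mem_cons_self
          omega
        · exact hfirst y h hkey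

theorem A_max_spec (keyf : Int → Int) (xs : List Int) (hpw : xs.Pairwise (· < ·)) (hne : xs ≠ []) :
    ∃ m, PySem.List.max? xs keyf = some m ∧ m ∈ xs
      ∧ ∀ y ∈ xs, keyf y ≤ keyf m ∧ (keyf y = keyf m → m ≤ y) := by
  match xs, hne with
  | x :: t, _ =>
    have hpc := List.pairwise_cons.mp hpw
    obtain ⟨m, hm, hmem, hab, hall, heq, hfirst⟩ :=
      maxfold_aux keyf
        (fun acc x => match acc with
          | none => some x
          | some mm => if keyf mm < keyf x then some x else some mm)
        (fun _ _ => rfl) t x hpc.2 hpc.1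
    refine ⟨m, ?_, ?_, ?_⟩
    · rw [PySem.List.max?,
        List.foldl_ext _ (fun acc x => match acc with
          | none => some x
          | some mm => if keyf mm < keyf x then some x else some mm) none
          (fun a x _ => by cases a <;> rfl),
        List.foldl_cons]
      exact hm
    · exact hmem.elim (fun h => h ▸ List.mem_cons_self) (List.mem_cons_of_mem x)
    · intro y hy
      rcases List.mem_cons.mp hy with h | h
      · subst h
        exact ⟨hab, fun hkey => le_of_eq (heq hkey.symm)⟩
      · exact ⟨hall y h, hfirst y h⟩

theorem bestfold_aux (f : Option (Int × Int) → (Int × Int) → Option (Int × Int))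
    (hf : ∀ q p, f (some q) p = if p.2 > q.2 ∨ (p.2 = q.2 ∧ p.1 < q.1) then some p else some q)
    (L : List (Int × Int)) :
    ∀ (q : Int × Int),
    ∃ p, L.foldl f (some q) = some p
      ∧ (p = q ∨ p ∈ L)
      ∧ ∀ r ∈ q :: L, r.2 ≤ p.2 ∧ (r.2 = p.2 → p.1 ≤ r.1) := by
  induction L with
  | nil => exact fun q => ⟨q, rfl, Or.inl rfl, by simp⟩
  | cons r L ih =>
    intro q
    simp only [List.foldl_cons, hf]
    by_cases hc : r.2 > q.2 ∨ (r.2 = q.2 ∧ r.1 < q.1)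
    · rw [if_pos hc]
      obtain ⟨p, hp, hmem, hdom⟩ := ih r
      have hdr := hdom r List.mem_cons_self
      refine ⟨p, hp, Or.inr (hmem.elim (fun h => h ▸ List.mem_cons_self) (List.mem_cons_of_mem r)), ?_⟩
      intro s hs
      rcases List.mem_cons.mp hs with h | h
      · subst h
        rcases hc with hc | hc
        · constructor
          · omega
          · intro h; omega
        · constructor
          · omega
          · intro h
            have := hdr.2 (by omega)
            omega
      · exact hdom s h
    · rw [if_neg hc]
      obtain ⟨p, hp, hmem, hdom⟩ := ih q
      have hdq := hdom q List.mem_cons_self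
      refine ⟨p, hp, hmem.imp id (List.mem_cons_of_mem r), ?_⟩
      intro s hs
      rcases List.mem_cons.mp hs with h | h
      · subst h; exact hdq
      rcases List.mem_cons.mp h with h | h
      · subst h
        have hc1 : s.2 ≤ q.2 := not_lt.mp (fun hgt => hc (Or.inl hgt))
        constructor
        · exact le_trans hc1 hdq.1
        · intro h2
          have he : s.2 = q.2 := by omega
          have hq1 : q.1 ≤ s.1 := not_lt.mp (fun hlt => hc (Or.inr ⟨he, hlt⟩))
          have hp1 : p.1 ≤ q.1 := hdq.2 (by omega)
          omega
      · exact hdom s (List.mem_cons_of_mem q h)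

theorem bestfold_none (f : Option (Int × Int) → (Int × Int) → Option (Int × Int))
    (hf0 : ∀ p, f none p = some p)
    (hf : ∀ q p, f (some q) p = if p.2 > q.2 ∨ (p.2 = q.2 ∧ p.1 < q.1) then some p else some q)
    (i0 : Int × Int) (L : List (Int × Int)) :
    ∃ p, (i0 :: L).foldl f none = some p
      ∧ (p = i0 ∨ p ∈ L)
      ∧ ∀ r ∈ i0 :: L, r.2 ≤ p.2 ∧ (r.2 = p.2 → p.1 ≤ r.1) := by
  rw [List.foldl_cons, hf0]
  exact bestfold_aux f hf L i0

theorem ofList_eq_nil_iff (xs : List Int) : PySem.Set.ofList xs = [] ↔ xs = [] := by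
  constructor
  · intro h; rw [List.eq_nil_iff_forall_not_mem]; intro v hv
    have := (PySem.Set.mem_ofList (y := v) (xs := xs)).2 hv
    simp [h] at this
  · intro h; simp [h]

theorem final_glue (DA TB : List Int)
    (hcnt : ∀ v, DA.count v = 2 * TB.count v)
    (hmemiff : ∀ v, v ∈ DA ↔ v ∈ TB)
    (hTne : TB ≠ []) :
    (PySem.List.max? (PySem.List.sorted (PySem.Dict.counter DA).keys (fun v => v) false)
        (fun v => (PySem.Dict.counter DA).getD v 0)).getD 14
    = (match (PySem.Dict.counter TB).items.foldl (fun best p =>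
        match best with
        | none => some p
        | some q => if p.2 > q.2 ∨ (p.2 = q.2 ∧ p.1 < q.1) then some p else some q) none with
      | none => 14
      | some q => q.1) := by
  obtain ⟨w, hw⟩ := List.exists_mem_of_ne_nil _ hTne
  have hDAne : DA ≠ [] := List.ne_nil_of_mem ((hmemiff w).2 hw)
  have hgetD : ∀ v, (PySem.Dict.counter DA).getD v 0 = DA.count v := fun v =>
    PySem.Dict.getD_counter DA v
  -- A side: the first maximal key of the sorted key list
  have hpw : (PySem.List.sorted (PySem.Set.ofList DA) (fun v => v) false).Pairwise (· < ·) :=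
    PySem.List.sorted_ofList_pairwise_lt DA
  have hsne : PySem.List.sorted (PySem.Set.ofList DA) (fun v => v) false ≠ [] := by
    intro h
    rw [PySem.List.sorted_eq_nil_iff] at h
    exact hDAne ((ofList_eq_nil_iff DA).1 h)
  obtain ⟨m, hmax, hmem, hdom⟩ :=
    A_max_spec (fun v => (PySem.Dict.counter DA).getD v 0)
      (PySem.List.sorted (PySem.Set.ofList DA) (fun v => v) false) hpw hsne
  rw [PySem.Dict.keys_counter, hmax, Option.getD_some]
  -- B side: the linear scan over the counter's items
  rw [PySem.Dict.items_counter]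
  have hmapne : (PySem.Set.ofList TB).map (fun k => (k, (TB.count k : Int))) ≠ [] := by
    intro h
    rw [List.map_eq_nil_iff] at h
    exact hTne ((ofList_eq_nil_iff TB).1 h)
  obtain ⟨i0, L, hil⟩ := List.exists_cons_of_ne_nil hmapne
  rw [hil]
  obtain ⟨p, hp, hpmem, hpdom⟩ := bestfold_none (fun best p => match best with
      | none => some p
      | some q => if p.2 > q.2 ∨ (p.2 = q.2 ∧ p.1 < q.1) then some p else some q)
      (fun _ => rfl) (fun _ _ => rfl) i0 L
  rw [hp]
  show m = p.1
  -- A's result is the smallest most-common value of TB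
  have hPA : Pbest TB m := by
    constructor
    · exact (hmemiff m).1 ((PySem.Set.mem_ofList _ _).1 ((PySem.List.mem_sorted _ _ _ _).1 hmem))
    · intro y hy
      have hyS : y ∈ PySem.List.sorted (PySem.Set.ofList DA) (fun v => v) false :=
        (PySem.List.mem_sorted _ _ _ _).2 ((PySem.Set.mem_ofList _ _).2 ((hmemiff y).2 hy))
      have hd := hdom y hyS
      rw [hgetD, hgetD, hcnt, hcnt] at hd
      obtain ⟨hd1, hd2⟩ := hd
      exact ⟨by omega, fun h => hd2 (by omega)⟩
  -- B's result is the smallest most-common value of TB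
  have hPB : Pbest TB p.1 := by
    have hpitems : p ∈ (PySem.Set.ofList TB).map (fun k => (k, (TB.count k : Int))) := by
      rw [hil]
      exact hpmem.elim (fun h => h ▸ List.mem_cons_self) (List.mem_cons_of_mem i0)
    obtain ⟨k, hk, hpk⟩ := List.mem_map.mp hpitems
    rw [← hpk]
    dsimp only
    constructor
    · exact (PySem.Set.mem_ofList _ _).1 hk
    · intro y hy
      have hr : (y, (TB.count y : Int)) ∈ i0 :: L := by
        rw [← hil]
        exact List.mem_map.mpr ⟨y, (PySem.Set.mem_ofList _ _).2 hy, rfl⟩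
      have hd := hpdom (y, (TB.count y : Int)) hr
      rw [← hpk] at hd
      dsimp only at hd
      constructor
      · exact_mod_cast hd.1
      · intro h
        exact hd.2 (by exact_mod_cast h)
  exact Pbest_unique TB m p.1 hPA hPB

-- ===== VERDICT (by name: the statement is the Claim_ definition above) =====
set_option maxHeartbeats 1000000 in
theorem infer_grid_spacing_py_spec : Claim_equal_infer_grid_spacing_py := by
  intro nodes config _
  show infer_grid_spacing_py nodes config = infer_grid_spacing_py_alt nodes config
  simp only [infer_grid_spacing_py, infer_grid_spacing_py_alt]
  rw [A_outer (dGetD config "grid_spacing_min" 12) (dGetD config "grid_spacing_max" 18) nodes nodes ([], [])]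
  rw [altCount_eq]
  simp only [List.nil_append]
  rw [PySem.Dict.foldl_insert_getD_add_one_eq_counter, ← PySem.Dict.counter_eq_foldl]
  by_cases hT : T (dGetD config "grid_spacing_min" 12) (dGetD config "grid_spacing_max" 18) nodes = []
  · have hDA : (nodes.flatMap (fun n => nodes.flatMap (fx (dGetD config "grid_spacing_min" 12) (dGetD config "grid_spacing_max" 18) n))
        ++ nodes.flatMap (fun n => nodes.flatMap (fy (dGetD config "grid_spacing_min" 12) (dGetD config "grid_spacing_max" 18) n))) = [] := by
      rw [List.eq_nil_iff_forall_not_mem]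
      intro v hv
      have := (mem_DA_iff_mem_T _ _ nodes v).1 hv
      rw [hT] at this
      simp at this
    rw [hDA, hT]
    decide
  · obtain ⟨v0, hv0⟩ := List.exists_mem_of_ne_nil _ hT
    have hv0DA := (mem_DA_iff_mem_T (dGetD config "grid_spacing_min" 12) (dGetD config "grid_spacing_max" 18) nodes v0).2 hv0
    have hDAne : (nodes.flatMap (fun n => nodes.flatMap (fx (dGetD config "grid_spacing_min" 12) (dGetD config "grid_spacing_max" 18) n))
        ++ nodes.flatMap (fun n => nodes.flatMap (fy (dGetD config "grid_spacing_min" 12) (dGetD config "grid_spacing_max" 18) n))) ≠ [] :=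
      List.ne_nil_of_mem hv0DA
    have hsize : (PySem.Dict.counter (nodes.flatMap (fun n => nodes.flatMap (fx (dGetD config "grid_spacing_min" 12) (dGetD config "grid_spacing_max" 18) n))
        ++ nodes.flatMap (fun n => nodes.flatMap (fy (dGetD config "grid_spacing_min" 12) (dGetD config "grid_spacing_max" 18) n)))).size ≠ 0 := by
      have hk := PySem.Dict.keys_counter (xs := (nodes.flatMap (fun n => nodes.flatMap (fx (dGetD config "grid_spacing_min" 12) (dGetD config "grid_spacing_max" 18) n))
        ++ nodes.flatMap (fun n => nodes.flatMap (fy (dGetD config "grid_spacing_min" 12) (dGetD config "grid_spacing_max" 18) n))))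
      have hkne : (PySem.Dict.counter (nodes.flatMap (fun n => nodes.flatMap (fx (dGetD config "grid_spacing_min" 12) (dGetD config "grid_spacing_max" 18) n))
        ++ nodes.flatMap (fun n => nodes.flatMap (fy (dGetD config "grid_spacing_min" 12) (dGetD config "grid_spacing_max" 18) n)))).keys ≠ [] := by
        rw [hk]
        intro h
        exact hDAne ((ofList_eq_nil_iff _).1 h)
      simp only [PySem.Dict.size, PySem.Dict.keys] at *
      intro h
      rw [List.length_eq_zero_iff] at h
      simp [h] at hkne
    rw [if_neg hsize]
    exact final_glue _ _
      (count_DA (dGetD config "grid_spacing_min" 12) (dGetD config "grid_spacing_max" 18) nodes)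
      (mem_DA_iff_mem_T (dGetD config "grid_spacing_min" 12) (dGetD config "grid_spacing_max" 18) nodes)
      hT
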